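-- pv_equiv track=rewrite | github.com/abdelfattah-lab/SplitReason | annotated_dataset/behavior_fullset.py | get_bigmodel_mask
-- ===== SOURCE A (Python) =====
-- def get_bigmodel_mask(text, index, open_tag="<bigmodel>", close_tag="<\\bigmodel>"):
--     mask = [0] * len(text)
--     start_index = 0
--
--     while True:
--         open_pos = text.find(open_tag, start_index)
--         if open_pos == -1:
--             break  # no more openings
--
--         close_pos = text.find(close_tag, open_pos + len(open_tag))
--         if close_pos == -1:
--             # If we can't find a close tag, mark until the end of the text
--             for i in range(open_pos, len(text)):
--                 mask[i] = 1
--             break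
--         else:
--             # Mark the region from <bigmodel> ... </bigmodel>
--             region_end = close_pos + len(close_tag)
--             for i in range(open_pos, region_end):
--                 mask[i] = 1
--             start_index = region_end
--
--     return mask
-- ===== SOURCE B (Python) =====
-- def get_bigmodel_mask(text, index, open_tag="<bigmodel>", close_tag="<\\bigmodel>"):
--     # Single left-to-right scan with an in-region flag, emitting the mask as it goes.
--     if not open_tag:
--         return [1] * len(text)  # a zero-width open tag starts a region at every position
--     lo, lc = len(open_tag), len(close_tag)
--     mask = []
--     inside = False
--     i = 0
--     n = len(text)
--     while i < n:
--         if inside: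
--             if lc == 0:
--                 inside = False  # zero-width close ends the region immediately
--             elif text.startswith(close_tag, i):
--                 mask += [1] * lc
--                 i += lc
--                 inside = False
--             else:
--                 mask.append(1)
--                 i += 1
--         elif text.startswith(open_tag, i):
--             mask += [1] * lo
--             i += lo
--             inside = True
--         else:
--             mask.append(0)
--             i += 1
--     return mask
-- ===== Notes on version B (the rewrite author's own statement) =====
-- stated objective: alternative
-- what changed: A repeatedly calls str.find and mutates a preallocated mask array via nested marking loops; B is a single left-to-right character scan with an in-region flag that emits the mask as it goes (zero-width open tag collapses to an all-ones mask). Pre_ only excludes open_tag and close_tag both empty, where A loops forever.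
import Mathlib
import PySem

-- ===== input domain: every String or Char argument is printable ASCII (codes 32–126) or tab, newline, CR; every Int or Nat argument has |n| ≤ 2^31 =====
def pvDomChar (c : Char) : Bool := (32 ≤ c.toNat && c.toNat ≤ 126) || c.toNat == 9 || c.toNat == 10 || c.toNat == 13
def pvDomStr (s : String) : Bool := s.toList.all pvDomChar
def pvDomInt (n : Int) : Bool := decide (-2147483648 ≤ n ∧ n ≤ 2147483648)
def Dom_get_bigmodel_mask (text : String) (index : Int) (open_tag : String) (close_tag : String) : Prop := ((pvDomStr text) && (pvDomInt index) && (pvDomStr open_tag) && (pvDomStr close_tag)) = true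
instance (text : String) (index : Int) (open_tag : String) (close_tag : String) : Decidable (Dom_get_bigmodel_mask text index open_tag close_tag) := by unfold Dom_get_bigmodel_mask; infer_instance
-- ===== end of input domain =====

-- B replaces A's find-and-mark loops by a single left-to-right scan with an in-region flag
-- that emits the mask as it goes (alternative decomposition, no speed claim).

-- ===== PORT A =====
-- the while-loop of A; fuel (= len(text)+1) only makes the loop total: under
-- Pre_ start_index strictly increases and stays ≤ len(text), so fuel never runs out
def pvALoop (cs o c : List Char) (fuel : Nat) (mask : List Int) (start : Int) : List Int :=
  match fuel with
  | 0 => mask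
  | fuel + 1 =>
    -- open_pos = text.find(open_tag, start_index); close_pos = text.find(close_tag, open_pos + len(open_tag))
    -- region_end = close_pos + len(close_tag); the locals are inlined
    if PySem.Chars.findFrom cs o start none = -1 then mask
    else
      if PySem.Chars.findFrom cs c (PySem.Chars.findFrom cs o start none + (o.length : Int)) none = -1 then
        -- for i in range(open_pos, len(text)): mask[i] = 1
        (PySem.List.pyRange (PySem.Chars.findFrom cs o start none) (cs.length : Int) 1).foldl
          (fun m i => PySem.List.pySetD m i 1) mask
      else
        pvALoop cs o c fuel
          ((PySem.List.pyRange (PySem.Chars.findFrom cs o start none)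
              (PySem.Chars.findFrom cs c (PySem.Chars.findFrom cs o start none + (o.length : Int)) none + (c.length : Int)) 1).foldl
            (fun m i => PySem.List.pySetD m i 1) mask)
          (PySem.Chars.findFrom cs c (PySem.Chars.findFrom cs o start none + (o.length : Int)) none + (c.length : Int))

def get_bigmodel_mask (text : String) (index : Int) (open_tag : String) (close_tag : String) : List Int :=
  pvALoop text.toList open_tag.toList close_tag.toList (text.toList.length + 1)
    (List.replicate text.toList.length 0) 0

-- ===== PORT B =====
-- Source B's while-loop: state (mask, inside, i); text.startswith(tag, i) is
-- PySem.Chars.startswith (cs.drop i) tag for 0 ≤ i < len(text), which is exact there.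
-- ho : o ≠ [] records that Source B only enters the loop with a nonempty open tag.
def pvBScan (cs : List Char) (oh : Char) (ot : List Char) (c : List Char) (mask : List Int) (inside : Bool) (i : Nat) : List Int :=
  if h : i < cs.length then
    if inside then
      if hc0 : c.length = 0 then
        pvBScan cs oh ot c mask false i
      else if PySem.Chars.startswith (cs.drop i) c then
        pvBScan cs oh ot c (mask ++ List.replicate c.length 1) false (i + c.length)
      else
        pvBScan cs oh ot c (mask ++ [1]) true (i + 1)
    else if PySem.Chars.startswith (cs.drop i) (oh :: ot) then
      pvBScan cs oh ot c (mask ++ List.replicate (oh :: ot).length 1) true (i + (oh :: ot).length)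
    else
      pvBScan cs oh ot c (mask ++ [0]) false (i + 1)
  else mask
termination_by 2 * (cs.length - i) + (if inside then 1 else 0)
decreasing_by
  all_goals simp_wf
  all_goals first | omega | (simp_all; try omega)

def get_bigmodel_mask_alt (text : String) (index : Int) (open_tag : String) (close_tag : String) : List Int :=
  match open_tag.toList with
  | [] => List.replicate text.toList.length 1
  | oh :: ot => pvBScan text.toList oh ot close_tag.toList [] false 0

-- ===== PRECONDITION & SPEC =====
-- Pre_ excludes exactly open_tag = "" ∧ close_tag = "": there A's while-loop never
-- advances start_index (find("") always succeeds in place) and A loops forever.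
def Pre_get_bigmodel_mask (text : String) (index : Int) (open_tag : String) (close_tag : String) : Prop :=
  open_tag ≠ "" ∨ close_tag ≠ ""
instance (text : String) (index : Int) (open_tag : String) (close_tag : String) : Decidable (Pre_get_bigmodel_mask text index open_tag close_tag) := by unfold Pre_get_bigmodel_mask; infer_instance

def pvWitness_get_bigmodel_mask : String × Int × String × String :=
  ("a<bigmodel>b c<\\bigmodel>d", 0, "<bigmodel>", "<\\bigmodel>")

def Spec_get_bigmodel_mask (text : String) (index : Int) (open_tag : String) (close_tag : String) (out : List Int) : Prop := out = get_bigmodel_mask_alt text index open_tag close_tag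
instance (text : String) (index : Int) (open_tag : String) (close_tag : String) (out : List Int) : Decidable (Spec_get_bigmodel_mask text index open_tag close_tag out) := by unfold Spec_get_bigmodel_mask; infer_instance

-- ===== CLAIM (what is proved, stated in full; the proofs are below) =====
def Claim_equal_get_bigmodel_mask : Prop := ∀ (text : String) (index : Int) (open_tag : String) (close_tag : String), Dom_get_bigmodel_mask text index open_tag close_tag → Pre_get_bigmodel_mask text index open_tag close_tag → Spec_get_bigmodel_mask text index open_tag close_tag (get_bigmodel_mask text index open_tag close_tag)

-- ===== LEMMAS AND PROOFS =====

-- no occurrence of `sub` anywhere from position s on, from a failed find on the drop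
theorem pvNoPrefixFrom (cs sub : List Char) (s : Nat)
    (h : PySem.Chars.find (cs.drop s) sub = -1) :
    ∀ j, s ≤ j → ¬ sub <+: cs.drop j := by
  rw [PySem.Chars.find_eq_neg_one_iff] at h
  intro j hj hp
  apply h
  have hdj : cs.drop j = (cs.drop s).drop (j - s) := by
    rw [List.drop_drop]; congr 1; omega
  rw [hdj] at hp
  exact hp.isInfix.trans (List.drop_suffix _ _).isInfix

-- marking loop of A: writing 1 into every index of [a, b) of mask
theorem pvMarkRange (mask : List Int) (a b : Nat) (hab : a ≤ b) (hb : b ≤ mask.length) :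
    (PySem.List.pyRange (a : Int) (b : Int) 1).foldl (fun m i => PySem.List.pySetD m i 1) mask
      = mask.take a ++ List.replicate (b - a) 1 ++ mask.drop b := by
  obtain ⟨d, rfl⟩ : ∃ d, b = a + d := ⟨b - a, by omega⟩
  clear hab
  induction d generalizing a mask with
  | zero =>
    rw [PySem.List.pyRange_one_eq_nil (by omega)]
    simp
  | succ d ih =>
    rw [PySem.List.pyRange_one_cons (by exact_mod_cast Nat.lt_add_of_pos_right (Nat.succ_pos d))]
    simp only [List.foldl_cons, PySem.List.pySetD_natCast]
    have hcast : ((a : Int) + 1) = ((a + 1 : Nat) : Int) := by push_cast; ring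
    have hend : ((a + (d+1) : Nat) : Int) = ((a + 1 + d : Nat) : Int) := by push_cast; ring
    rw [hcast, hend, ih (mask.set a 1) (a+1) (by simpa using by omega : a + 1 + d ≤ (mask.set a 1).length)]
    have ha : a < mask.length := by omega
    rw [List.set_eq_take_cons_drop _ ha]
    rw [List.take_append, List.drop_append]
    simp [List.length_take, Nat.min_eq_left ha.le]
    have h1 : List.take (a+1) (List.take a mask) = List.take a mask := by
      rw [List.take_take]; congr 1; omega
    have h2 : List.drop (a+1+d) (List.take a mask) = [] :=
      List.drop_eq_nil_of_le (by simp [List.length_take]; omega)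
    have h3 : a+1+d-a = d+1 := by omega
    rw [h1, h2, h3, List.drop_succ_cons, List.drop_drop]
    have h4 : d + (a + 1) = a + (d + 1) := by omega
    simp [List.replicate_succ]
    congr 1
    omega

-- B scans d zeros when the open tag matches nowhere in [s, s+d)
theorem pvBScan_skip_zeros (cs : List Char) (oh : Char) (ot c : List Char) (d : Nat) :
    ∀ (s : Nat) (mask : List Int), s + d ≤ cs.length →
    (∀ j, s ≤ j → j < s + d → ¬ (oh :: ot) <+: cs.drop j) →
    pvBScan cs oh ot c mask false s = pvBScan cs oh ot c (mask ++ List.replicate d 0) false (s + d) := by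
  induction d with
  | zero => intro s mask _ _; simp
  | succ d ih =>
    intro s mask hsd hnp
    have hs : s < cs.length := by omega
    have hsw : PySem.Chars.startswith (cs.drop s) (oh :: ot) = false := by
      rw [Bool.eq_false_iff]
      intro hT
      exact hnp s le_rfl (by omega) ((PySem.Chars.startswith_iff _ _).mp hT)
    rw [pvBScan]
    simp only [dif_pos hs, if_neg (Bool.false_ne_true), hsw, Bool.false_eq_true, if_false]
    rw [ih (s+1) (mask ++ [0]) (by omega) (fun j hj hj2 => hnp j (by omega) (by omega))]
    have : (mask ++ [0]) ++ List.replicate d 0 = mask ++ List.replicate (d+1) 0 := by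
      simp [List.replicate_succ]
    rw [this]
    congr 1
    omega

-- B scans d ones inside a region when the close tag matches nowhere in [s, s+d)
theorem pvBScan_skip_ones (cs : List Char) (oh : Char) (ot c : List Char) (hc : c ≠ []) (d : Nat) :
    ∀ (s : Nat) (mask : List Int), s + d ≤ cs.length →
    (∀ j, s ≤ j → j < s + d → ¬ c <+: cs.drop j) →
    pvBScan cs oh ot c mask true s = pvBScan cs oh ot c (mask ++ List.replicate d 1) true (s + d) := by
  induction d with
  | zero => intro s mask _ _; simp
  | succ d ih =>
    intro s mask hsd hnp
    have hs : s < cs.length := by omega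
    have hc0 : c.length ≠ 0 := fun h => hc (List.length_eq_zero_iff.mp h)
    have hsw : PySem.Chars.startswith (cs.drop s) c = false := by
      rw [Bool.eq_false_iff]
      intro hT
      exact hnp s le_rfl (by omega) ((PySem.Chars.startswith_iff _ _).mp hT)
    rw [pvBScan]
    simp only [dif_pos hs]
    rw [if_pos trivial, dif_neg hc0, if_neg (by simp [hsw])]
    rw [ih (s+1) (mask ++ [1]) (by omega) (fun j hj hj2 => hnp j (by omega) (by omega))]
    have : (mask ++ [1]) ++ List.replicate d 1 = mask ++ List.replicate (d+1) 1 := by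
      simp [List.replicate_succ]
    rw [this]
    congr 1
    omega

-- B emits ones to the end when the close tag matches nowhere from s on
theorem pvBScan_no_close (cs : List Char) (oh : Char) (ot c : List Char) (d : Nat) :
    ∀ (s : Nat) (mask : List Int), s + d = cs.length →
    (∀ j, s ≤ j → ¬ c <+: cs.drop j) →
    pvBScan cs oh ot c mask true s = mask ++ List.replicate d 1 := by
  intro s mask hsd hnp
  have hc : c ≠ [] := by
    intro rfl'
    exact hnp s le_rfl (by simp [rfl'])
  rw [pvBScan_skip_ones cs oh ot c hc d s mask (by omega) (fun j hj _ => hnp j hj)]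
  rw [pvBScan]
  simp [hsd]

-- A with an empty open tag paints everything from start_index on
theorem pvALoop_empty_open (cs c : List Char) (hc : c ≠ []) (d : Nat) :
    ∀ (fuel s : Nat) (maskB : List Int), s + d = cs.length → maskB.length = s →
    cs.length + 1 - s ≤ fuel →
    pvALoop cs [] c fuel (maskB ++ List.replicate d 0) (s : Int) = maskB ++ List.replicate d 1 := by
  induction d using Nat.strong_induction_on with
  | _ d ih =>
  intro fuel s maskB hsd hlen hfuel
  obtain ⟨f, rfl⟩ : ∃ f, fuel = f + 1 := ⟨fuel - 1, by omega⟩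
  have hs : s ≤ cs.length := by omega
  have hmlen : (maskB ++ List.replicate d 0).length = cs.length := by
    simp [hlen]; omega
  rw [pvALoop]
  have hofind : PySem.Chars.findFrom cs [] (s : Int) none = (s : Int) := by
    rw [PySem.Chars.findFrom_natCast cs [] s hs, PySem.Chars.find_nil]
    norm_num
  rw [hofind, if_neg (show ¬ ((s : Int)) = -1 by omega)]
  simp only [List.length_nil, Nat.cast_zero, add_zero]
  rw [PySem.Chars.findFrom_natCast cs c s hs]
  by_cases hf : PySem.Chars.find (cs.drop s) c = -1
  · rw [if_pos hf, if_pos rfl]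
    rw [pvMarkRange _ s cs.length hs (by omega)]
    rw [List.take_append, List.drop_append]
    have h5 : List.take s maskB = maskB := by rw [← hlen, List.take_length]
    have h6 : List.drop cs.length maskB = [] := List.drop_eq_nil_of_le (by omega)
    have h7 : cs.length - s = d := by omega
    simp [h5, h6, h7, hlen]
  · rw [if_neg hf, if_neg (by
      have := PySem.Chars.neg_one_le_find (cs.drop s) c
      omega : ¬ ((s : Int) + PySem.Chars.find (cs.drop s) c = -1))]
    have hnn : 0 ≤ PySem.Chars.find (cs.drop s) c := by
      have := PySem.Chars.neg_one_le_find (cs.drop s) c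
      omega
    obtain ⟨hpre, -⟩ := PySem.Chars.find_spec hnn
    set q := (PySem.Chars.find (cs.drop s) c).toNat with hq
    have hclen : 0 < c.length := List.length_pos_iff.mpr hc
    have hqlc : q + c.length ≤ d := by
      have h := hpre.length_le
      rw [List.length_drop, List.length_drop] at h
      omega
    have hcast : (s : Int) + PySem.Chars.find (cs.drop s) c + (c.length : Int)
        = ((s + q + c.length : Nat) : Int) := by
      push_cast [hq]
      omega
    rw [hcast, pvMarkRange _ s (s + q + c.length) (by omega) (by omega)]
    rw [List.take_append, List.drop_append]
    simp only [hlen, Nat.sub_self, List.take_zero, List.take_length, List.append_nil,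
      List.drop_replicate]
    have htk : List.take s maskB = maskB := by simp [hlen]
    have hdropm : List.drop (s + q + c.length) maskB = [] :=
      List.drop_eq_nil_of_le (by omega)
    have harr : maskB.take s ++ List.replicate (s + q + c.length - s) 1 ++
        (maskB.drop (s + q + c.length) ++ List.replicate (d - (s + q + c.length - s)) 0)
        = (maskB ++ List.replicate (q + c.length) 1) ++ List.replicate (d - (q + c.length)) 0 := by
      rw [htk, hdropm]
      simp only [List.nil_append, List.append_assoc]
      congr 2
      · congr 1; omega
      · congr 1; omega
    calc pvALoop cs [] c f
          (maskB.take s ++ List.replicate (s + q + c.length - s) 1 ++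
            (maskB.drop (s + q + c.length) ++ List.replicate (d - (s + q + c.length - s)) 0))
          ((s + q + c.length : Nat) : Int)
        = pvALoop cs [] c f
          ((maskB ++ List.replicate (q + c.length) 1) ++ List.replicate (d - (q + c.length)) 0)
          ((s + q + c.length : Nat) : Int) := by rw [harr]
      _ = (maskB ++ List.replicate (q + c.length) 1) ++ List.replicate (d - (q + c.length)) 1 := by
          apply ih (d - (q + c.length)) (by omega) f (s + q + c.length)
          · omega
          · simp [hlen]; omega
          · omega
      _ = maskB ++ List.replicate d 1 := by
          rw [List.append_assoc, List.replicate_append_replicate]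
          congr 2
          omega


-- main loop correspondence for a nonempty open tag
theorem pvLoop_eq_scan (cs : List Char) (oh : Char) (ot c : List Char) (d : Nat) :
    ∀ (fuel s : Nat) (maskB : List Int), s + d = cs.length → maskB.length = s →
    cs.length + 1 - s ≤ fuel →
    pvALoop cs (oh :: ot) c fuel (maskB ++ List.replicate d 0) (s : Int) = pvBScan cs oh ot c maskB false s := by
  induction d using Nat.strong_induction_on with
  | _ d ih =>
  intro fuel s maskB hsd hlen hfuel
  obtain ⟨f, rfl⟩ : ∃ f, fuel = f + 1 := ⟨fuel - 1, by omega⟩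
  have hs : s ≤ cs.length := by omega
  have hmlen : (maskB ++ List.replicate d 0).length = cs.length := by simp [hlen]; omega
  rw [pvALoop, PySem.Chars.findFrom_natCast cs (oh :: ot) s hs]
  by_cases hof : PySem.Chars.find (cs.drop s) (oh :: ot) = -1
  · rw [if_pos hof, if_pos rfl]
    rw [pvBScan_skip_zeros cs oh ot c d s maskB (by omega)
      (fun j hj _ => pvNoPrefixFrom cs (oh :: ot) s hof j hj)]
    rw [pvBScan]
    rw [dif_neg (by omega)]
  · rw [if_neg hof]
    have hnn : 0 ≤ PySem.Chars.find (cs.drop s) (oh :: ot) := by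
      have := PySem.Chars.neg_one_le_find (cs.drop s) (oh :: ot)
      omega
    obtain ⟨hpre, hmin⟩ := PySem.Chars.find_spec hnn
    set p := (PySem.Chars.find (cs.drop s) (oh :: ot)).toNat with hp
    rw [List.drop_drop] at hpre
    have hplo : p + (oh :: ot).length ≤ d := by
      have h := hpre.length_le
      rw [List.length_drop] at h
      have hlo : 0 < (oh :: ot).length := by simp
      omega
    have hlo : 0 < (oh :: ot).length := by simp
    rw [if_neg (by omega : ¬ ((s : Int) + PySem.Chars.find (cs.drop s) (oh :: ot) = -1))]
    -- absolute open position and close-search start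
    have hopcast : (s : Int) + PySem.Chars.find (cs.drop s) (oh :: ot) = ((s + p : Nat) : Int) := by
      push_cast [hp]; omega
    set m := s + p + (oh :: ot).length with hm
    have hmcast : ((s + p : Nat) : Int) + ((oh :: ot).length : Int) = (m : Int) := by
      push_cast [hm]; omega
    have hmn : m ≤ cs.length := by omega
    rw [hopcast, hmcast, PySem.Chars.findFrom_natCast cs c m hmn]
    -- the B side skips p zeros, then consumes the open tag
    have hskip : pvBScan cs oh ot c maskB false s
        = pvBScan cs oh ot c ((maskB ++ List.replicate p 0) ++ List.replicate (oh :: ot).length 1) true m := by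
      rw [pvBScan_skip_zeros cs oh ot c p s maskB (by omega)
        (fun j hj hj2 => by
          have := hmin (j - s) (by omega)
          rw [List.drop_drop] at this
          have hje : s + (j - s) = j := by omega
          rwa [hje] at this)]
      rw [pvBScan, dif_pos (by omega : s + p < cs.length)]
      have hsw : PySem.Chars.startswith (cs.drop (s + p)) (oh :: ot) = true :=
        (PySem.Chars.startswith_iff _ _).mpr hpre
      simp only [Bool.false_eq_true, if_false, hsw, if_true, hm]
    rw [hskip]
    by_cases hcf : PySem.Chars.find (cs.drop m) c = -1
    · -- no close tag: A marks to the end, B emits ones to the end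
      rw [if_pos hcf, if_pos rfl]
      rw [pvMarkRange _ (s + p) cs.length (by omega) (by omega)]
      rw [pvBScan_no_close cs oh ot c (cs.length - m) m _ (by omega)
        (pvNoPrefixFrom cs c m hcf)]
      rw [List.take_append, List.drop_append]
      have h5 : List.take (s + p) maskB = maskB := List.take_of_length_le (by omega)
      have h6 : List.drop cs.length maskB = [] := List.drop_eq_nil_of_le (by omega)
      rw [h5, h6, List.take_replicate, List.drop_replicate]
      simp only [List.nil_append, List.append_assoc, List.replicate_append_replicate]
      have e1 : min (s + p - maskB.length) d = p := by omega
      have e2 : cs.length - (s + p) = (oh :: ot).length + (cs.length - m) := by omega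
      rw [hlen] at e1 ⊢
      rw [e1, show d - (cs.length - s) = 0 from by omega]
      simp only [List.replicate_zero, List.append_nil]
      congr 3
    · -- close tag found: both sides continue at regionEnd
      have hcnn : 0 ≤ PySem.Chars.find (cs.drop m) c := by
        have := PySem.Chars.neg_one_le_find (cs.drop m) c
        omega
      obtain ⟨hcpre, hcmin⟩ := PySem.Chars.find_spec hcnn
      set q := (PySem.Chars.find (cs.drop m) c).toNat with hq
      rw [List.drop_drop] at hcpre
      have hq' : (q : Int) = PySem.Chars.find (cs.drop m) c := by
        rw [hq]; exact Int.toNat_of_nonneg hcnn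
      have hfl := PySem.Chars.find_le_length (cs.drop m) c
      rw [List.length_drop] at hfl
      have hqlc : m + q + c.length ≤ cs.length := by
        have h := hcpre.length_le
        rw [List.length_drop] at h
        omega
      rw [if_neg hcf, if_neg (show ¬ ((m : Int) + PySem.Chars.find (cs.drop m) c = -1) from by
        intro hEq
        have := hcnn
        omega)]
      set e := m + q + c.length with he
      have hecast : (m : Int) + PySem.Chars.find (cs.drop m) c + (c.length : Int) = (e : Int) := by
        push_cast [hq, he]; omega
      rw [hecast, pvMarkRange _ (s + p) e (by omega) (by omega)]
      -- the marked array is again (prefix B would have built) ++ zeros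
      have harr : (maskB ++ List.replicate d 0).take (s + p) ++ List.replicate (e - (s + p)) 1 ++
          (maskB ++ List.replicate d 0).drop e
          = ((maskB ++ List.replicate p 0) ++ List.replicate (e - (s + p)) 1) ++ List.replicate (d - (e - s)) 0 := by
        rw [List.take_append, List.drop_append]
        have h5 : List.take (s + p) maskB = maskB := List.take_of_length_le (by omega)
        have h6 : List.drop e maskB = [] := List.drop_eq_nil_of_le (by omega)
        rw [h5, h6, List.take_replicate, List.drop_replicate, hlen]
        have e1 : min (s + p - s) d = p := by omega
        have e2 : e - s = d - (d - (e - s)) := by omega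
        rw [e1]
        simp only [List.nil_append, List.append_assoc]
      rw [harr]
      have hstep : pvALoop cs (oh :: ot) c f
          (((maskB ++ List.replicate p 0) ++ List.replicate (e - (s + p)) 1) ++ List.replicate (d - (e - s)) 0)
          (e : Int)
          = pvBScan cs oh ot c ((maskB ++ List.replicate p 0) ++ List.replicate (e - (s + p)) 1) false e := by
        apply ih (d - (e - s)) (by omega) f e
        · omega
        · simp [hlen]; omega
        · omega
      rw [hstep]
      -- B: inside the region, skip q ones, then consume the close tag
      by_cases hcnil : c = []
      · subst hcnil
        have hq0 : q = 0 := by simp [hq, PySem.Chars.find_nil]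
        have hme : e = m := by rw [he, hq0]; simp
        have hrepl : e - (s + p) = (oh :: ot).length := by
          rw [hme]; omega
        rw [hrepl, hme]
        by_cases hmn' : m < cs.length
        · conv_rhs => rw [pvBScan]
          rw [dif_pos hmn', if_pos rfl, dif_pos (show ([] : List Char).length = 0 from rfl)]
        · rw [pvBScan, dif_neg hmn', pvBScan, dif_neg hmn']
      · rw [pvBScan_skip_ones cs oh ot c hcnil q m _ (by have := List.length_pos_iff.mpr hcnil; omega)
          (fun j hj hj2 => by
            have := hcmin (j - m) (by omega)
            rw [List.drop_drop] at this
            have hje : m + (j - m) = j := by omega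
            rwa [hje] at this)]
        have hclen : 0 < c.length := List.length_pos_iff.mpr hcnil
        conv_rhs => rw [pvBScan]
        rw [dif_pos (by omega : m + q < cs.length), if_pos rfl,
          dif_neg (by omega : ¬ c.length = 0)]
        have hsw : PySem.Chars.startswith (cs.drop (m + q)) c = true :=
          (PySem.Chars.startswith_iff _ _).mpr hcpre
        rw [if_pos hsw]
        have hmask : maskB ++ List.replicate p 0 ++ List.replicate (oh :: ot).length 1 ++
            List.replicate q 1 ++ List.replicate c.length 1
            = maskB ++ List.replicate p 0 ++ List.replicate (e - (s + p)) 1 := by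
          simp only [List.append_assoc, List.replicate_append_replicate]
          congr 3
          omega
        rw [hmask, show m + q + c.length = e from by omega]

-- ===== VERDICT (by name: the statement is the Claim_ definition above) =====
theorem get_bigmodel_mask_spec : Claim_equal_get_bigmodel_mask := by
  intro text index open_tag close_tag _ hpre
  unfold Spec_get_bigmodel_mask get_bigmodel_mask get_bigmodel_mask_alt
  cases ho : open_tag.toList with
  | nil =>
    have hcne : close_tag.toList ≠ [] := by
      rcases hpre with h | h
      · exact absurd (String.toList_eq_nil_iff.mp ho) h
      · exact fun hx => h (String.toList_eq_nil_iff.mp hx)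
    have := pvALoop_empty_open text.toList close_tag.toList hcne text.toList.length
      (text.toList.length + 1) 0 [] (by omega) rfl (by omega)
    simpa using this
  | cons oh ot =>
    have := pvLoop_eq_scan text.toList oh ot close_tag.toList text.toList.length
      (text.toList.length + 1) 0 [] (by omega) rfl (by omega)
    simpa using this
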